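-- pv_equiv track=rewrite | github.com/irakl1ikvinchia/GOA-CW-HW | Day 0023/classwork/classwork.py | replace_even_indexes
-- ===== SOURCE A (Python) =====
-- def replace_even_indexes(word, replace_char):
--     changed_word = ""
--     for i in range(len(word)):
--         if i % 2 == 0:
--             changed_word += replace_char
--         else:
--             changed_word += word[i]
--     return changed_word
-- ===== SOURCE B (Python) =====
-- def replace_even_indexes(word, replace_char):
--     chars = list(word)
--     for i in range(0, len(word), 2):
--         chars[i] = replace_char
--     return ''.join(chars)
-- ===== Notes on version B (the rewrite author's own statement) =====
-- stated objective: simpler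
-- what changed: A builds the result by appending per-index with an i%2 parity branch; B copies the word into a list, overwrites only the even positions via range(0, len, 2) with no parity test, and joins.
import Mathlib
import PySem

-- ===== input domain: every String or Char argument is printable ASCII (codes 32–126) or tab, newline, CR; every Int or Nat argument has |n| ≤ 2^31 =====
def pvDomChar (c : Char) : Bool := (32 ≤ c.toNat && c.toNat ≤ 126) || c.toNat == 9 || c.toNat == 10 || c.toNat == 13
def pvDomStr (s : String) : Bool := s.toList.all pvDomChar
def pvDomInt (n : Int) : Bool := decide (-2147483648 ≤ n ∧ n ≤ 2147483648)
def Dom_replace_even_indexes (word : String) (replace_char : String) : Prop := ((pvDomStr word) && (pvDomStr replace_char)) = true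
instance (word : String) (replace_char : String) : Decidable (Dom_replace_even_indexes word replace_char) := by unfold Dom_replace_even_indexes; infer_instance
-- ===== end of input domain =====

-- B replaces A's per-index parity branch and string concatenation by copy-then-patch:
-- copy the word, overwrite only the even positions (range step 2), join; objective: simpler.

-- ===== PORT A =====
-- A: accumulate changed_word over i in range(len(word)), branching on i % 2
-- (the growing Python string is modelled as a List Char, built into a String at the end).
def replace_even_indexes (word : String) (replace_char : String) : String :=
  let changed_word : List Char :=
    (PySem.List.pyRange 0 (PySem.Str.len word) 1).foldl
      (fun changed_word i =>
        if PySem.Int.mod i 2 = 0 then changed_word ++ replace_char.toList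
        else changed_word ++ [PySem.List.pyGetD word.toList i ' '])
      []
  String.ofList changed_word

-- ===== PORT B =====
-- B: chars = list(word); chars[i] = replace_char for i in range(0, len(word), 2); ''.join(chars).
def replace_even_indexes_alt (word : String) (replace_char : String) : String :=
  let chars : List (List Char) := word.toList.map (fun c => [c])
  let chars :=
    (PySem.List.pyRange 0 (PySem.Str.len word) 2).foldl
      (fun chars i => chars.set i.toNat replace_char.toList) chars
  String.ofList (PySem.Chars.join [] chars)

-- ===== PRECONDITION & SPEC =====
def Spec_replace_even_indexes (word : String) (replace_char : String) (out : String) : Prop := out = replace_even_indexes_alt word replace_char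
instance (word : String) (replace_char : String) (out : String) : Decidable (Spec_replace_even_indexes word replace_char out) := by unfold Spec_replace_even_indexes; infer_instance

-- ===== CLAIM (what is proved, stated in full; the proofs are below) =====
def Claim_equal_replace_even_indexes : Prop := ∀ (word : String) (replace_char : String), Dom_replace_even_indexes word replace_char → Spec_replace_even_indexes word replace_char (replace_even_indexes word replace_char)

-- ===== LEMMAS AND PROOFS =====

-- ''.join on a list of pieces is flatten.
theorem pv_join_nil_flatten (ps : List (List Char)) : PySem.Chars.join [] ps = ps.flatten := by
  induction ps with
  | nil => rfl
  | cons p t ih =>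
    cases t with
    | nil => simp [PySem.Chars.join, List.intercalate]
    | cons q u =>
      simp only [PySem.Chars.join, List.intercalate, List.intersperse] at *
      simp_all

-- what the patched list holds at each position
theorem pv_foldl_set_getElem? {α : Type} (xs : List Int) (init : List α) (v : α) (j : Nat)
    (hpos : ∀ i ∈ xs, 0 ≤ i) :
    (xs.foldl (fun cs i => cs.set i.toNat v) init)[j]? =
      if (j : Int) ∈ xs then (if j < init.length then some v else none) else init[j]? := by
  induction xs generalizing init with
  | nil => simp
  | cons x t ih =>
    have hx : 0 ≤ x := hpos x (by simp)
    rw [List.foldl_cons, ih _ (fun i hi => hpos i (by simp [hi]))]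
    by_cases hmem : (j : Int) ∈ t
    · simp [hmem, List.length_set]
    · by_cases hxj : x = (j : Int)
      · have h1 : x.toNat = j := by omega
        simp [hmem, hxj, List.getElem?_set]
      · have h1 : x.toNat ≠ j := by omega
        have h2 : ¬ ((j : Int) = x) := fun h => hxj h.symm
        simp [hmem, h2, h1]

-- characterisation of A's accumulation as a flatMap over the index range
theorem pv_A_chars (cs r : List Char) :
    (PySem.List.pyRange 0 (cs.length : Int) 1).foldl
      (fun changed_word i =>
        if PySem.Int.mod i 2 = 0 then changed_word ++ r
        else changed_word ++ [PySem.List.pyGetD cs i ' '])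
      []
    = (List.range cs.length).flatMap (fun k => if k % 2 = 0 then r else [cs.getD k ' ']) := by
  rw [PySem.List.pyRange_one, List.foldl_map]
  have h1 : ((cs.length : Int) - 0).toNat = cs.length := by omega
  rw [h1]
  have h2 : (fun (changed_word : List Char) (k : Nat) =>
        if PySem.Int.mod ((0 : Int) + (k : Int)) 2 = 0 then changed_word ++ r
        else changed_word ++ [PySem.List.pyGetD cs ((0 : Int) + (k : Int)) ' '])
      = fun changed_word k => changed_word ++ (if k % 2 = 0 then r else [cs.getD k ' ']) := by
    funext acc k
    have hc : ((0 : Int) + (k : Int)) = ((k : Int)) := by omega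
    rw [hc, PySem.List.pyGetD_natCast]
    have hm : PySem.Int.mod ((k : Int)) 2 = ((k % 2 : Nat) : Int) :=
      PySem.Int.mod_natCast k 2
    by_cases he : k % 2 = 0
    · simp [he]
      intro h
      omega
    · simp [he]
      intro h
      exfalso
      omega
  rw [h2, PySem.List.foldl_append_eq_flatMap]
  simp

-- characterisation of B's patched copy, position by position
theorem pv_B_chars (cs r : List Char) :
    (PySem.List.pyRange 0 (cs.length : Int) 2).foldl
      (fun chars i => chars.set i.toNat r) (cs.map fun c => [c])
    = (List.range cs.length).map (fun k => if k % 2 = 0 then r else [cs.getD k ' ']) := by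
  have hpos : ∀ i ∈ PySem.List.pyRange 0 (cs.length : Int) 2, 0 ≤ i := by
    intro i hi
    have := (PySem.List.mem_pyRange_iff_of_pos (by norm_num) i).1 hi
    omega
  apply List.ext_getElem?
  intro j
  rw [pv_foldl_set_getElem? _ _ _ _ hpos]
  have hmem : ((j : Int) ∈ PySem.List.pyRange 0 (cs.length : Int) 2)
      ↔ (j < cs.length ∧ j % 2 = 0) := by
    rw [PySem.List.mem_pyRange_iff_of_pos (by norm_num)]
    constructor
    · rintro ⟨_, hlt, hdvd⟩
      refine ⟨by omega, ?_⟩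
      omega
    · rintro ⟨hlt, he⟩
      refine ⟨by omega, by omega, ?_⟩
      omega
  by_cases hj : j < cs.length
  · by_cases he : j % 2 = 0
    · have : ((j : Int) ∈ PySem.List.pyRange 0 (cs.length : Int) 2) := hmem.2 ⟨hj, he⟩
      simp [this, hj, he]
    · have : ¬ ((j : Int) ∈ PySem.List.pyRange 0 (cs.length : Int) 2) := fun h => he (hmem.1 h).2
      have hg : cs[j]? = some cs[j] := List.getElem?_eq_getElem hj
      simp [this, hj, he, List.getD_eq_getElem?_getD]
  · have : ¬ ((j : Int) ∈ PySem.List.pyRange 0 (cs.length : Int) 2) := fun h => hj (hmem.1 h).1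
    have hg : cs[j]? = none := List.getElem?_eq_none (by omega)
    simp [this, hj]

-- ===== VERDICT (by name: the statement is the Claim_ definition above) =====
theorem replace_even_indexes_spec : Claim_equal_replace_even_indexes := by
  intro word replace_char _
  unfold Spec_replace_even_indexes replace_even_indexes replace_even_indexes_alt
  rw [PySem.Str.len_eq]
  simp only [pv_A_chars word.toList replace_char.toList,
    pv_B_chars word.toList replace_char.toList, pv_join_nil_flatten, List.flatMap_def]
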